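-- pv_equiv track=rewrite | github.com/errorzeroo/pythonStudy | programmers/codechallenge/countPrice.py | solution
-- ===== SOURCE A (Python) =====
-- def solution(price, money, count):
--     cnt = 0
--     for c in range(1, count+1):
--         cnt += price * c
--     if cnt - money > 0:
--         return cnt - money
--     else:
--         return 0
-- ===== SOURCE B (Python) =====
-- def solution(price, money, count):
--     n = count if count > 0 else 0
--     shortage = price * n * (n + 1) // 2 - money
--     return shortage if shortage > 0 else 0
-- ===== Notes on version B (the rewrite author's own statement) =====
-- stated objective: faster
-- what changed: Replaces the O(count) summation loop with the arithmetic-series closed form price*n*(n+1)//2.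
import Mathlib
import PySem

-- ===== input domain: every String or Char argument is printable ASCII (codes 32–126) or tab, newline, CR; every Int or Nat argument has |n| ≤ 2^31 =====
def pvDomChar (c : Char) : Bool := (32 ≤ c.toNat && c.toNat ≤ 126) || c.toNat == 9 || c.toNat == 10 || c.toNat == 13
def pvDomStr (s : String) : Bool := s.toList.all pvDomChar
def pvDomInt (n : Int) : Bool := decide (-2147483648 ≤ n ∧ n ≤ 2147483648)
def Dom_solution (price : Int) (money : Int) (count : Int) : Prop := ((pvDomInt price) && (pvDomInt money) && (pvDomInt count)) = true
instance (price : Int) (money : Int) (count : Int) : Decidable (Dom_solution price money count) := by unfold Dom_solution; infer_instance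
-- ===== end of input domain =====

-- B replaces A's O(count) summation loop with the closed-form arithmetic series price*n*(n+1)//2 (O(1)).

-- ===== PORT A =====
def solution (price : Int) (money : Int) (count : Int) : Int :=
  let cnt := (PySem.List.pyRange 1 (count + 1) 1).foldl (fun cnt c => cnt + price * c) 0
  if cnt - money > 0 then cnt - money else 0

-- ===== PORT B =====
def solution_alt (price : Int) (money : Int) (count : Int) : Int :=
  let n := if count > 0 then count else 0
  let shortage := PySem.Int.floordiv (price * n * (n + 1)) 2 - money
  if shortage > 0 then shortage else 0

-- ===== PRECONDITION & SPEC =====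
def Spec_solution (price : Int) (money : Int) (count : Int) (out : Int) : Prop := out = solution_alt price money count
instance (price : Int) (money : Int) (count : Int) (out : Int) : Decidable (Spec_solution price money count out) := by unfold Spec_solution; infer_instance

-- ===== CLAIM (what is proved, stated in full; the proofs are below) =====
def Claim_equal_solution : Prop := ∀ (price : Int) (money : Int) (count : Int), Dom_solution price money count → Spec_solution price money count (solution price money count)

-- ===== LEMMAS AND PROOFS =====

-- twice the loop sum equals price*k*(k+1)
theorem pv_sum_loop (price : Int) (k : Nat) (s : Int) :
    2 * (PySem.List.pyRange 1 ((k : Int) + 1) 1).foldl (fun acc c => acc + price * c) s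
      = 2 * s + price * (k : Int) * ((k : Int) + 1) := by
  induction k generalizing s with
  | zero =>
    rw [PySem.List.pyRange_one_eq_nil (by norm_num)]
    simp
  | succ n ih =>
    have h : PySem.List.pyRange 1 ((n : Int) + 1 + 1) 1
        = PySem.List.pyRange 1 ((n : Int) + 1) 1 ++ [(n : Int) + 1] :=
      PySem.List.pyRange_one_succ_right (by omega)
    push_cast
    rw [h, List.foldl_append]
    simp only [List.foldl_cons, List.foldl_nil]
    have := ih s
    push_cast at this
    linarith [this]

theorem pv_floordiv_two (x : Int) : PySem.Int.floordiv (2 * x) 2 = x := by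
  simp [PySem.Int.floordiv, Int.mul_fdiv_cancel_left x (by norm_num : (2:Int) ≠ 0)]

-- ===== VERDICT (by name: the statement is the Claim_ definition above) =====
theorem solution_spec : Claim_equal_solution := by
  intro price money count _
  unfold Spec_solution solution solution_alt
  by_cases hc : count > 0
  · simp only [if_pos hc]
    obtain ⟨k, hk⟩ : ∃ k : Nat, count = (k : Int) :=
      ⟨count.toNat, by omega⟩
    subst hk
    have hsum := pv_sum_loop price k 0
    set cnt := (PySem.List.pyRange 1 ((k : Int) + 1) 1).foldl (fun acc c => acc + price * c) 0 with hcnt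
    have : price * (k : Int) * ((k : Int) + 1) = 2 * cnt := by omega
    rw [this, pv_floordiv_two]
  · simp only [if_neg hc]
    rw [PySem.List.pyRange_one_eq_nil (by omega)]
    simp [PySem.Int.floordiv]
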